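-- pv_equiv track=rewrite | github.com/ccc6501/F22-command | slidestrip.py | fill_down_rows
-- ===== SOURCE A (Python) =====
-- def fill_down_rows(rows: list) -> list:
--     """
--     Carry non-empty values downward within each column.
--     This helps when PPT tables leave repeated values blank.
--     """
--     if not rows:
--         return rows
--
--     max_cols = max(len(r) for r in rows)
--     last_vals = ["" for _ in range(max_cols)]
--     for r in rows:
--         # Ensure row is long enough to index safely
--         if len(r) < max_cols:
--             r.extend([""] * (max_cols - len(r)))
--         for i, val in enumerate(r):
--             cell = (val or "").strip()
--             if cell:
--                 last_vals[i] = val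
--             elif last_vals[i]:
--                 r[i] = last_vals[i]
--     return rows
-- ===== SOURCE B (Python) =====
-- def fill_down_rows(rows: list) -> list:
--     """
--     Carry non-empty values downward within each column.
--     Segment-based rewrite: transpose into columns, locate each column's
--     non-blank "anchor" cells once, rebuild the column as concatenated
--     segments (each anchor's value replicated across the blank gap below it),
--     then transpose back into the original row objects.
--     """
--     if not rows:
--         return rows
--
--     n = max(len(r) for r in rows)
--     m = len(rows)
--     filled_cols = []
--     for i in range(n):
--         col = [r[i] if i < len(r) else "" for r in rows]
--         anchors = [(j, v) for j, v in enumerate(col) if (v or "").strip()]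
--         if not anchors:
--             out = col
--         else:
--             out = col[:anchors[0][0] + 1]
--             for (a, va), (b, vb) in zip(anchors, anchors[1:]):
--                 out.extend([va] * (b - a - 1))
--                 out.append(vb)
--             al, vl = anchors[-1]
--             out.extend([vl] * (m - al - 1))
--         filled_cols.append(out)
--
--     for j, r in enumerate(rows):
--         r[:] = [c[j] for c in filled_cols]
--     return rows
-- ===== Notes on version B (the rewrite author's own statement) =====
-- stated objective: alternative
-- what changed: A's single row-major pass carrying a per-column last_vals array is replaced by a three-stage segment algorithm: transpose into columns, compute each column's list of non-blank anchor positions once and rebuild the column as concatenated replicated segments between anchors, then transpose back.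
import Mathlib
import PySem

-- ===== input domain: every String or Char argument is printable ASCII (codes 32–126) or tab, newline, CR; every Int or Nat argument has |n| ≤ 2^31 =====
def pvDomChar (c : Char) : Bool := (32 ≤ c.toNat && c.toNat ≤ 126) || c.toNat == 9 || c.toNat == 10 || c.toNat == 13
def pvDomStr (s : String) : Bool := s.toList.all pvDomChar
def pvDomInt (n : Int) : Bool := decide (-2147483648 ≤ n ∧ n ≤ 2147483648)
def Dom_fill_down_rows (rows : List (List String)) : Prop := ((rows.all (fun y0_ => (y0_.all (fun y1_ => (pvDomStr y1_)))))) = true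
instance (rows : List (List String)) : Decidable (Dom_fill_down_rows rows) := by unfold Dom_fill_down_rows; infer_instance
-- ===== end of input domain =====

-- B replaces A's single stateful carry pass over rows by a three-stage segment algorithm:
-- transpose into columns, rebuild each column from its non-blank anchor positions by
-- replicating anchor values across the blank gaps, transpose back; same cost, different
-- algorithm.  Both Pythons mutate `rows` in place to the same final contents (A pads and
-- writes cells, B slice-assigns whole rows); the theorems are about the return value.

-- ===== PORT A =====
-- (val or "").strip() is truthy
def pvCell (v : String) : Bool := decide (PySem.Str.strip (if v == "" then "" else v) ≠ "")

-- r.extend([""] * (max_cols - len(r))) guarded by len(r) < max_cols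
def pvPadTo (n : Nat) (r : List String) : List String :=
  if r.length < n then r ++ List.replicate (n - r.length) "" else r

-- A's inner `for i, val in enumerate(r)` loop: walks the row and last_vals together,
-- returning (updated row, updated last_vals)
def pvRowStep : List String → List String → List String × List String
  | v :: vs, l :: ls =>
    let rest := pvRowStep vs ls
    if pvCell v then (v :: rest.1, v :: rest.2)
    else if l ≠ "" then (l :: rest.1, l :: rest.2)
    else (v :: rest.1, l :: rest.2)
  | _, _ => ([], [])

-- A's outer `for r in rows` loop carrying last_vals
def pvFillA : List String → List (List String) → List (List String)
  | _, [] => []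
  | lv, r :: rs =>
    let r1 := pvPadTo lv.length r
    let p := pvRowStep r1 lv
    p.1 :: pvFillA p.2 rs

def fill_down_rows (rows : List (List String)) : List (List String) :=
  if rows = [] then rows
  else
    let max_cols := (rows.map List.length).foldl Nat.max 0
    pvFillA (List.replicate max_cols "") rows

-- ===== PORT B =====
-- B's comprehension `[(j, v) for j, v in enumerate(col) if (v or "").strip()]`,
-- transcribed structurally with the running index k
def pvAnchorsFrom (k : Nat) : List String → List (Nat × String)
  | [] => []
  | v :: vs => if pvCell v then (k, v) :: pvAnchorsFrom (k + 1) vs else pvAnchorsFrom (k + 1) vs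

-- B's `for (a, va), (b, vb) in zip(anchors, anchors[1:])` loop plus the trailing
-- `out.extend([vl] * (m - al - 1))`, carrying the previous anchor
def pvSegsB (m : Nat) : Nat × String → List (Nat × String) → List String
  | (a, va), [] => List.replicate (m - a - 1) va
  | (a, va), (b, vb) :: bs => List.replicate (b - a - 1) va ++ vb :: pvSegsB m (b, vb) bs

-- body of B's `for i in range(n)` loop for one column
def pvFillColB (m : Nat) (col : List String) : List String :=
  match pvAnchorsFrom 0 col with
  | [] => col
  | (a0, v0) :: rest => col.take (a0 + 1) ++ pvSegsB m (a0, v0) rest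

def fill_down_rows_alt (rows : List (List String)) : List (List String) :=
  if rows = [] then rows
  else
    let n := (rows.map List.length).foldl Nat.max 0
    let m := rows.length
    -- col = [r[i] if i < len(r) else "" for r in rows]  (r[i] in range: List.getD)
    let cols := (List.range n).map (fun i => rows.map (fun r => if i < r.length then r.getD i "" else ""))
    let filled := cols.map (pvFillColB m)
    -- r[:] = [c[j] for c in filled_cols]  (c[j] in range: List.getD)
    (List.range m).map (fun j => filled.map (fun c => c.getD j ""))

-- ===== PRECONDITION & SPEC =====
def Spec_fill_down_rows (rows : List (List String)) (out : List (List String)) : Prop := out = fill_down_rows_alt rows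
instance (rows : List (List String)) (out : List (List String)) : Decidable (Spec_fill_down_rows rows out) := by unfold Spec_fill_down_rows; infer_instance

-- ===== CLAIM (what is proved, stated in full; the proofs are below) =====
def Claim_equal_fill_down_rows : Prop := ∀ (rows : List (List String)), Dom_fill_down_rows rows → Spec_fill_down_rows rows (fill_down_rows rows)

-- ===== LEMMAS AND PROOFS =====

-- column i of a matrix, read with default ""
def pvColOf (i : Nat) (M : List (List String)) : List String := M.map (fun r => r.getD i "")

-- the down-scan of one column with carry l (A's per-column behaviour)
def pvColScan : String → List String → List String
  | _, [] => []
  | l, v :: vs =>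
    if pvCell v then v :: pvColScan v vs
    else if l ≠ "" then l :: pvColScan l vs
    else v :: pvColScan l vs

def pvF (v l : String) : String := if pvCell v then v else if l ≠ "" then l else v
def pvG (v l : String) : String := if pvCell v then v else l

theorem pvRowStep_eq (r lv : List String) :
    pvRowStep r lv = (List.zipWith pvF r lv, List.zipWith pvG r lv) := by
  induction r generalizing lv with
  | nil => cases lv <;> rfl
  | cons v vs ih =>
    cases lv with
    | nil => rfl
    | cons l ls =>
      simp only [pvRowStep, ih, List.zipWith, pvF, pvG]
      split_ifs <;> simp

theorem pvPadTo_length {n : Nat} {r : List String} (h : r.length ≤ n) :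
    (pvPadTo n r).length = n := by
  unfold pvPadTo
  split_ifs with h'
  · simp; omega
  · omega

theorem pvFillA_map_length (M : List (List String)) (lv : List String)
    (h : ∀ r ∈ M, r.length ≤ lv.length) :
    (pvFillA lv M).map List.length = M.map (fun _ => lv.length) := by
  induction M generalizing lv with
  | nil => simp [pvFillA]
  | cons r rs ih =>
    have hr : r.length ≤ lv.length := h r (by simp)
    have h1 : (pvPadTo lv.length r).length = lv.length := pvPadTo_length hr
    have hlv' : (List.zipWith pvG (pvPadTo lv.length r) lv).length = lv.length := by
      simp [List.length_zipWith, h1]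
    simp only [pvFillA, pvRowStep_eq, List.map_cons]
    rw [ih _ (by intro x hx; rw [hlv']; exact h x (by simp [hx]))]
    simp [List.length_zipWith, h1, hlv']

theorem pvFillA_col (M : List (List String)) (lv : List String) (i : Nat)
    (h : ∀ r ∈ M, r.length ≤ lv.length) (hi : i < lv.length) :
    pvColOf i (pvFillA lv M) =
      pvColScan (lv.getD i "") (pvColOf i (M.map (pvPadTo lv.length))) := by
  induction M generalizing lv with
  | nil => simp [pvFillA, pvColOf, pvColScan]
  | cons r rs ih =>
    have hr : r.length ≤ lv.length := h r (by simp)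
    have h1 : (pvPadTo lv.length r).length = lv.length := pvPadTo_length hr
    have hi1 : i < (pvPadTo lv.length r).length := by omega
    have hmin : i < min (pvPadTo lv.length r).length lv.length := by omega
    have hlv' : (List.zipWith pvG (pvPadTo lv.length r) lv).length = lv.length := by
      simp [List.length_zipWith, h1]
    have hgf : (List.zipWith pvF (pvPadTo lv.length r) lv).getD i "" =
        pvF ((pvPadTo lv.length r).getD i "") (lv.getD i "") := by
      rw [List.getD_eq_getElem _ _ (by simpa using hmin),
          List.getD_eq_getElem _ _ hi1, List.getD_eq_getElem _ _ hi,
          List.getElem_zipWith]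
    have hgg : (List.zipWith pvG (pvPadTo lv.length r) lv).getD i "" =
        pvG ((pvPadTo lv.length r).getD i "") (lv.getD i "") := by
      rw [List.getD_eq_getElem _ _ (by simpa using hmin),
          List.getD_eq_getElem _ _ hi1, List.getD_eq_getElem _ _ hi,
          List.getElem_zipWith]
    have ihr := ih (List.zipWith pvG (pvPadTo lv.length r) lv)
      (by intro x hx; rw [hlv']; exact h x (by simp [hx])) (by omega)
    simp only [pvFillA, pvRowStep_eq, pvColOf, List.map_cons] at ihr ⊢
    rw [ihr, hgf, hgg, hlv']
    set v := (pvPadTo lv.length r).getD i ""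
    set L := lv.getD i ""
    simp only [pvColScan, pvF, pvG]
    split_ifs <;> rfl

theorem pvMatrixExt (P Q : List (List String)) (n : Nat)
    (hlen : P.length = Q.length)
    (hP : ∀ r ∈ P, r.length = n) (hQ : ∀ r ∈ Q, r.length = n)
    (hcol : ∀ i, i < n → pvColOf i P = pvColOf i Q) : P = Q := by
  apply List.ext_getElem hlen
  intro j hj hj'
  apply List.ext_getElem (by rw [hP _ (List.getElem_mem hj), hQ _ (List.getElem_mem hj')])
  intro i hi hi'
  have hin : i < n := by rw [← hP _ (List.getElem_mem hj)]; exact hi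
  have := hcol i hin
  have h1 : (pvColOf i P)[j]'(by simpa [pvColOf]) = P[j][i] := by
    simp [pvColOf, List.getElem?_eq_getElem hi]
  have h2 : (pvColOf i Q)[j]'(by simpa [pvColOf]) = Q[j][i] := by
    simp [pvColOf, List.getElem?_eq_getElem hi']
  rw [← h1, ← h2]
  simp only [this]

theorem pv_init_le_foldl_max (l : List Nat) (a : Nat) : a ≤ l.foldl Nat.max a := by
  induction l generalizing a with
  | nil => exact le_rfl
  | cons y ys ih => exact le_trans (Nat.le_max_left a y) (ih _)

theorem pv_le_foldl_max (l : List Nat) (a : Nat) (x : Nat) (hx : x ∈ l) :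
    x ≤ l.foldl Nat.max a := by
  induction l generalizing a with
  | nil => simp at hx
  | cons y ys ih =>
    rcases List.mem_cons.mp hx with rfl | h
    · exact le_trans (Nat.le_max_right a x) (pv_init_le_foldl_max ys _)
    · exact ih _ h

-- ----- B-side lemmas -----

theorem pvCell_empty : pvCell "" = false := by decide

theorem pvCell_ne_empty {v : String} (h : pvCell v = true) : v ≠ "" := by
  intro hv; subst hv; rw [pvCell_empty] at h; exact Bool.noConfusion h

theorem pvColScan_length (l : String) (c : List String) :
    (pvColScan l c).length = c.length := by
  induction c generalizing l with
  | nil => rfl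
  | cons v vs ih => simp only [pvColScan]; split_ifs <;> simp [ih]

theorem pvColScan_blank_prefix (pre rest : List String)
    (h : ∀ v ∈ pre, pvCell v = false) :
    pvColScan "" (pre ++ rest) = pre ++ pvColScan "" rest := by
  induction pre with
  | nil => rfl
  | cons v vs ih =>
    have hv : pvCell v = false := h v (by simp)
    simp only [List.cons_append, pvColScan, hv]
    simp [ih (fun x hx => h x (by simp [hx]))]

theorem pvColScan_all_blank (c : List String) (h : ∀ v ∈ c, pvCell v = false) :
    pvColScan "" c = c := by
  have := pvColScan_blank_prefix c [] h
  simpa [pvColScan] using this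

theorem pvAnchorsFrom_nil {k : Nat} {c : List String}
    (h : pvAnchorsFrom k c = []) : ∀ v ∈ c, pvCell v = false := by
  induction c generalizing k with
  | nil => simp
  | cons v vs ih =>
    simp only [pvAnchorsFrom] at h
    by_cases hv : pvCell v = true
    · rw [if_pos hv] at h; exact absurd h (by simp)
    · rw [if_neg hv] at h
      intro x hx
      rcases List.mem_cons.mp hx with rfl | hx'
      · exact Bool.eq_false_iff.mpr hv
      · exact ih h x hx'

theorem pvAnchorsFrom_ge (k : Nat) (c : List String) :
    ∀ p ∈ pvAnchorsFrom k c, k ≤ p.1 := by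
  induction c generalizing k with
  | nil => simp [pvAnchorsFrom]
  | cons v vs ih =>
    intro p hp
    simp only [pvAnchorsFrom] at hp
    by_cases hv : pvCell v = true
    · rw [if_pos hv] at hp
      rcases List.mem_cons.mp hp with rfl | hp'
      · exact le_rfl
      · exact le_trans (Nat.le_succ k) (ih (k + 1) p hp')
    · rw [if_neg hv] at hp
      exact le_trans (Nat.le_succ k) (ih (k + 1) p hp)

theorem pvSegsB_shift (m j : Nat) (va : String) (A : List (Nat × String))
    (hm : A = [] → j + 2 ≤ m) (hA : ∀ p ∈ A, j + 2 ≤ p.1) :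
    pvSegsB m (j, va) A = va :: pvSegsB m (j + 1, va) A := by
  cases A with
  | nil =>
      have h2 := hm rfl
      simp only [pvSegsB]
      rw [show m - j - 1 = (m - (j + 1) - 1) + 1 by omega]
      simp [List.replicate_succ]
  | cons p ps =>
      obtain ⟨b, vb⟩ := p
      have hb : j + 2 ≤ b := hA (b, vb) (by simp)
      simp only [pvSegsB]
      rw [show b - j - 1 = (b - (j + 1) - 1) + 1 by omega]
      simp [List.replicate_succ]

theorem pvScan_eq_segs (col : List String) (j : Nat) (va : String) (h : pvCell va = true) :
    pvColScan va col = pvSegsB (j + 1 + col.length) (j, va) (pvAnchorsFrom (j + 1) col) := by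
  induction col generalizing j va with
  | nil => simp [pvColScan, pvAnchorsFrom, pvSegsB]
  | cons v vs ih =>
    by_cases hv : pvCell v = true
    · have ihv := ih (j + 1) v hv
      simp only [pvColScan, pvAnchorsFrom, if_pos hv, List.length_cons, pvSegsB]
      rw [show j + 1 - j - 1 = 0 by omega]
      simp only [List.replicate_zero, List.nil_append]
      rw [show j + 1 + (vs.length + 1) = j + 1 + 1 + vs.length by omega, ← ihv]
    · have hva : va ≠ "" := pvCell_ne_empty h
      simp only [pvColScan, pvAnchorsFrom, if_neg hv, if_pos hva, List.length_cons]
      rw [pvSegsB_shift _ j va _ (fun _ => by omega)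
            (fun p hp => le_trans (by omega) (pvAnchorsFrom_ge (j + 2) vs p hp))]
      rw [show j + 1 + (vs.length + 1) = j + 1 + 1 + vs.length by omega, ← ih (j + 1) va h]

theorem pvAnchorsFrom_cons_split (c : List String) (k a0 : Nat) (v0 : String)
    (rest : List (Nat × String)) (h : pvAnchorsFrom k c = (a0, v0) :: rest) :
    ∃ pre suf, c = pre ++ v0 :: suf ∧ k + pre.length = a0 ∧
      (∀ v ∈ pre, pvCell v = false) ∧ pvCell v0 = true ∧
      rest = pvAnchorsFrom (a0 + 1) suf := by
  induction c generalizing k with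
  | nil => simp [pvAnchorsFrom] at h
  | cons v vs ih =>
    simp only [pvAnchorsFrom] at h
    by_cases hv : pvCell v = true
    · rw [if_pos hv] at h
      injection h with h1 h2
      injection h1 with hk hv0
      subst hk; subst hv0
      exact ⟨[], vs, by simp, by simp, by simp, hv, h2.symm⟩
    · rw [if_neg hv] at h
      obtain ⟨pre, suf, hc, hlen, hpre, hv0, hrest⟩ := ih (k + 1) h
      refine ⟨v :: pre, suf, by simp [hc], by simp; omega, ?_, hv0, hrest⟩
      intro x hx
      rcases List.mem_cons.mp hx with rfl | hx'
      · exact Bool.eq_false_iff.mpr hv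
      · exact hpre x hx'

theorem pvFillColB_eq_scan (col : List String) :
    pvFillColB col.length col = pvColScan "" col := by
  cases hA : pvAnchorsFrom 0 col with
  | nil =>
      simp [pvFillColB, hA, pvColScan_all_blank col (pvAnchorsFrom_nil hA)]
  | cons p rest =>
      obtain ⟨a0, v0⟩ := p
      obtain ⟨pre, suf, hc, hlen, hpre, hv0, hrest⟩ :=
        pvAnchorsFrom_cons_split col 0 a0 v0 rest hA
      have ha0 : a0 = pre.length := by omega
      subst hc; subst hrest; subst ha0
      simp only [pvFillColB, hA]
      have htake : (pre ++ v0 :: suf).take (pre.length + 1) = pre ++ [v0] := by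
        rw [List.take_append]
        simp
      have hlen2 : (pre ++ v0 :: suf).length = pre.length + 1 + suf.length := by
        simp; omega
      rw [htake, hlen2, ← pvScan_eq_segs suf pre.length v0 hv0,
          pvColScan_blank_prefix pre (v0 :: suf) hpre]
      simp only [pvColScan, if_pos hv0, List.append_assoc, List.cons_append, List.nil_append]

theorem pvCond_getD (i : Nat) (r : List String) :
    (if i < r.length then r.getD i "" else "") = r.getD i "" := by
  split_ifs with h
  · rfl
  · rw [List.getD_eq_default _ _ (by omega)]

theorem pvPad_getD {n : Nat} (r : List String) (i : Nat) (hi : i < n) :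
    (pvPadTo n r).getD i "" = r.getD i "" := by
  unfold pvPadTo
  split_ifs with h
  · have hlen : (r ++ List.replicate (n - r.length) ("" : String)).length = n := by
      rw [List.length_append, List.length_replicate]; omega
    by_cases hir : i < r.length
    · rw [List.getD_eq_getElem _ _ (show i < (r ++ List.replicate (n - r.length) ("" : String)).length by omega),
          List.getElem_append_left hir, List.getD_eq_getElem _ _ hir]
    · rw [List.getD_eq_getElem _ _ (show i < (r ++ List.replicate (n - r.length) ("" : String)).length by omega),
          List.getElem_append_right (by omega), List.getElem_replicate,
          List.getD_eq_default _ _ (by omega)]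
  · rfl

theorem pvColOf_pad (rows : List (List String)) (n i : Nat) (hi : i < n) :
    pvColOf i (rows.map (pvPadTo n)) = pvColOf i rows := by
  unfold pvColOf
  rw [List.map_map]
  exact List.map_congr_left (fun r _ => pvPad_getD r i hi)

theorem pv_map_range_getD (l : List String) :
    (List.range l.length).map (fun j => l.getD j "") = l := by
  apply List.ext_getElem (by simp)
  intro i h1 h2
  simp only [List.getElem_map, List.getElem_range]
  rw [List.getD_eq_getElem _ _ h2]

-- ===== VERDICT (by name: the statement is the Claim_ definition above) =====
theorem fill_down_rows_spec : Claim_equal_fill_down_rows := by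
  intro rows _
  unfold Spec_fill_down_rows fill_down_rows fill_down_rows_alt
  by_cases hnil : rows = []
  · simp [hnil]
  · simp only [if_neg hnil]
    set n := (rows.map List.length).foldl Nat.max 0 with hn
    set m := rows.length with hm
    set cols := (List.range n).map
      (fun i => rows.map (fun r => if i < r.length then r.getD i "" else "")) with hcols
    set filled := cols.map (pvFillColB m) with hfilled
    have hle : ∀ r ∈ rows, r.length ≤ n :=
      fun r hr => pv_le_foldl_max _ _ _ (List.mem_map_of_mem hr)
    have hrep : (List.replicate n ("" : String)).length = n := by simp
    have hAle : ∀ r ∈ rows, r.length ≤ (List.replicate n ("" : String)).length := by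
      simpa [hrep] using hle
    have hfl : filled.length = n := by simp [hfilled, hcols]
    -- each filled column equals the down-scan of the corresponding raw column
    have hfilled_i : ∀ i (hi : i < n),
        filled[i]'(by omega) = pvColScan "" (pvColOf i rows) := by
      intro i hi
      have hci : cols[i]'(by simp [hcols]; omega) = pvColOf i rows := by
        simp only [hcols, List.getElem_map, List.getElem_range]
        exact List.map_congr_left (fun r _ => pvCond_getD i r)
      have hlen : (pvColOf i rows).length = m := by simp [pvColOf, hm]
      calc filled[i]'(by omega)
          = pvFillColB m (cols[i]'(by simp [hcols]; omega)) := by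
            simp [hfilled]
        _ = pvFillColB (pvColOf i rows).length (pvColOf i rows) := by rw [hci, hlen]
        _ = pvColScan "" (pvColOf i rows) := pvFillColB_eq_scan _
    have hAmap := pvFillA_map_length rows (List.replicate n "") hAle
    apply pvMatrixExt _ _ n
    · have h1 : (pvFillA (List.replicate n "") rows).length = rows.length := by
        have := congrArg List.length hAmap; simpa using this
      simp [h1, hm]
    · intro r hr
      have : r.length ∈ (pvFillA (List.replicate n "") rows).map List.length :=
        List.mem_map_of_mem hr
      rw [hAmap] at this
      obtain ⟨x, _, hxe⟩ := List.mem_map.mp this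
      simp [hrep] at hxe; omega
    · intro r hr
      obtain ⟨j, hj, rfl⟩ := List.mem_map.mp hr
      simp [hfl]
    · intro i hi
      -- A's column
      rw [pvFillA_col rows (List.replicate n "") i hAle (by simpa using hi)]
      rw [hrep, pvColOf_pad rows n i hi]
      rw [List.getD_eq_getElem _ _ (by simpa using hi), List.getElem_replicate]
      -- B's column
      have hscan_len : (pvColScan "" (pvColOf i rows)).length = m := by
        simp [pvColScan_length, pvColOf, hm]
      have : pvColOf i ((List.range m).map (fun j => filled.map (fun c => c.getD j ""))) =
          (List.range m).map (fun j => (filled[i]'(by omega)).getD j "") := by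
        unfold pvColOf
        rw [List.map_map]
        apply List.map_congr_left
        intro j _
        simp only [Function.comp]
        rw [List.getD_eq_getElem _ _ (by simp [hfl]; omega), List.getElem_map]
      rw [this]
      rw [hfilled_i i hi, ← hscan_len, pv_map_range_getD]
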